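-- pv_equiv track=rewrite | github.com/codebyzeb/DYMULTI-23 | segmenter/utils.py | split_segmented_utterance
-- ===== SOURCE A (Python) =====
-- def split_segmented_utterance(segmented_utterance):
--     """ Takes a segmented utterance and splits it at the spaces
--
--     Parameters
--     ----------
--     segmented_utterance : str
--         The segmented utterance as a string of phonemes with spaces at word boundaries.
--
--     Returns
--     -------
--     words : list of list of str
--         A list of words, where each word is a string of phonemes.
--
--     """
--
--     words = []
--     w = []
--     for phoneme in segmented_utterance:
--         if phoneme == ' ':
--             if w != []:
--                 words.append(w)
--             w = []
--         else:
--             w.append(phoneme)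
--     if w != []:
--         words.append(w)
--     return words
-- ===== SOURCE B (Python) =====
-- def split_segmented_utterance(segmented_utterance):
--     return [list(word) for word in segmented_utterance.split(' ') if word]
-- ===== Notes on version B (the rewrite author's own statement) =====
-- stated objective: idiomatic
-- what changed: Replaces the per-character accumulator loop with a single str.split on the space separator, filtering out empty words and mapping each word to its character list.
import Mathlib
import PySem

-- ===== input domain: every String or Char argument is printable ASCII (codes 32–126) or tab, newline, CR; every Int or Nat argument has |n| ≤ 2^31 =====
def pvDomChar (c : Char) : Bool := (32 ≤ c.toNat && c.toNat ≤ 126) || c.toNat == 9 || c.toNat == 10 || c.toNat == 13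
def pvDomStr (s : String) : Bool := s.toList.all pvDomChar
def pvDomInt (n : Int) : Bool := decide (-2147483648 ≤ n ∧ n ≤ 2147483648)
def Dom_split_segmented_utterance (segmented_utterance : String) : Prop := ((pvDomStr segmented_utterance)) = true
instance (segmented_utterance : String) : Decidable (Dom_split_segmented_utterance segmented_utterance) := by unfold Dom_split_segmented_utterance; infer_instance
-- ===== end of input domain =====

-- B replaces A's per-character accumulator loop with split-on-space, filter of empty words, and a
-- per-word character map (idiomatic; same cost).

-- ===== PORT A =====
-- A: one pass over the characters, accumulating the current word w and the finished words.
def split_segmented_utterance (segmented_utterance : String) : List (List String) :=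
  let st := segmented_utterance.toList.foldl
    (fun (st : List (List String) × List String) phoneme =>
      if phoneme = ' ' then
        (if st.2 ≠ [] then st.1 ++ [st.2] else st.1, [])
      else
        (st.1, st.2 ++ [String.ofList [phoneme]]))
    ([], [])
  if st.2 ≠ [] then st.1 ++ [st.2] else st.1

-- ===== PORT B =====
-- B: split on ' ', drop empty words, map each word to the list of its one-character strings.
def split_segmented_utterance_alt (segmented_utterance : String) : List (List String) :=
  ((PySem.Chars.splitOn segmented_utterance.toList [' ']).filter (· ≠ [])).map
    (fun word => word.map (fun c => String.ofList [c]))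

-- ===== PRECONDITION & SPEC =====
def Spec_split_segmented_utterance (segmented_utterance : String) (out : List (List String)) : Prop := out = split_segmented_utterance_alt segmented_utterance
instance (segmented_utterance : String) (out : List (List String)) : Decidable (Spec_split_segmented_utterance segmented_utterance out) := by unfold Spec_split_segmented_utterance; infer_instance

-- ===== CLAIM (what is proved, stated in full; the proofs are below) =====
def Claim_equal_split_segmented_utterance : Prop := ∀ (segmented_utterance : String), Dom_split_segmented_utterance segmented_utterance → Spec_split_segmented_utterance segmented_utterance (split_segmented_utterance segmented_utterance)

-- ===== LEMMAS AND PROOFS =====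

-- Simple structural recursion characterising splitOn with the single-char separator ' '.
def spaceSplitAux : List Char → List Char → List (List Char)
  | [], cur => [cur.reverse]
  | c :: rest, cur =>
      if c = ' ' then cur.reverse :: spaceSplitAux rest []
      else spaceSplitAux rest (c :: cur)

theorem splitOn_go_space (l : List Char) : ∀ (fuel : Nat) (cur : List Char) (acc : List (List Char)),
    l.length ≤ fuel →
    PySem.Chars.splitOn.go [' '] fuel l cur acc = acc.reverse ++ spaceSplitAux l cur := by
  induction l with
  | nil =>
    intro fuel cur acc _
    cases fuel <;> simp [PySem.Chars.splitOn.go, spaceSplitAux]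
  | cons c rest ih =>
    intro fuel cur acc hfuel
    cases fuel with
    | zero => simp at hfuel
    | succ f =>
      simp only [List.length_cons, Nat.succ_le_succ_iff] at hfuel
      by_cases hc : c = ' '
      · subst hc
        rw [PySem.Chars.splitOn.go]
        simp [List.isPrefixOf, ih f [] (cur.reverse :: acc) hfuel, spaceSplitAux]
      · rw [PySem.Chars.splitOn.go]
        have : [' '].isPrefixOf (c :: rest) = false := by
          simp [List.isPrefixOf]
          exact fun h => (hc h.symm).elim
        simp [this, ih f (c :: cur) acc hfuel, spaceSplitAux, hc]

theorem splitOn_space (cs : List Char) :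
    PySem.Chars.splitOn cs [' '] = spaceSplitAux cs [] := by
  unfold PySem.Chars.splitOn
  rw [splitOn_go_space cs (cs.length + 1) [] [] (Nat.le_succ _)]
  rfl

-- The loop invariant connecting A's fold state with spaceSplitAux.
theorem fold_eq_split (cs : List Char) : ∀ (words : List (List String)) (v : List Char),
    (let st := cs.foldl
      (fun (st : List (List String) × List String) phoneme =>
        if phoneme = ' ' then
          (if st.2 ≠ [] then st.1 ++ [st.2] else st.1, [])
        else
          (st.1, st.2 ++ [String.ofList [phoneme]]))
      (words, v.map (fun c => String.ofList [c]))
     if st.2 ≠ [] then st.1 ++ [st.2] else st.1) =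
    words ++ ((spaceSplitAux cs v.reverse).filter (· ≠ [])).map
      (fun word => word.map (fun c => String.ofList [c])) := by
  induction cs with
  | nil =>
    intro words v
    by_cases hv : v = []
    · subst hv; simp [spaceSplitAux]
    · simp [spaceSplitAux, hv]
  | cons c rest ih =>
    intro words v
    by_cases hc : c = ' '
    · subst hc
      by_cases hv : v = []
      · subst hv
        simpa [spaceSplitAux] using ih words []
      · have h2 : v.map (fun c => String.ofList [c]) ≠ [] := by simp [hv]
        simpa [spaceSplitAux, hv, h2] using ih (words ++ [v.map (fun c => String.ofList [c])]) []
    · have := ih words (v ++ [c])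
      simp only [List.map_append, List.reverse_append] at this
      simpa [spaceSplitAux, hc] using this

-- ===== VERDICT (by name: the statement is the Claim_ definition above) =====
theorem split_segmented_utterance_spec : Claim_equal_split_segmented_utterance := by
  intro s _
  show split_segmented_utterance s = split_segmented_utterance_alt s
  unfold split_segmented_utterance split_segmented_utterance_alt
  rw [splitOn_space]
  simpa using fold_eq_split s.toList [] []
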